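-- pv_equiv track=rewrite | github.com/SolariSystems/linear-a-analysis | LINEAR_A_CORPUS_ANALYSIS.py | compute_commodity_associations
-- ===== SOURCE A (Python) =====
-- IDEOGRAMS = {
--     'OLE', 'OLE+U', 'OLE+A', 'OLE+E', 'OLE+KI', 'OLE+MI', 'OLE+DI',
--     'OLE+NE', 'OLE+TA', 'OLE+RI', 'OLE+QIf', 'OLE+TU', 'OLE+RA',
--     'OLE+QE+DI',
--     'GRA', 'VIN', 'FIC', 'NI', 'CYP', 'BOS', 'OVISm', 'OVISf',
--     'CAPm', 'CAPf', 'SUS', 'TELA', 'LANA', 'AES', 'AUR', 'OLIV',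
--     'ARE', 'AROM',
-- }
--
-- def compute_commodity_associations(tablet_contents, word_freq):
--     """Compute which words co-occur with which commodity ideograms."""
--     commodity_words = {}
--     for tablet_id, info in tablet_contents.items():
--         words = info['words']
--         commodities_on_tablet = [w for w in words
--                                   if w in IDEOGRAMS or w.startswith('OLE')]
--         non_commodities = [w for w in words
--                            if w not in IDEOGRAMS and not w.startswith('OLE')
--                            and not w.startswith('*') and w != 'KU-RO' and w != 'KI-RO']
--
--         for comm in commodities_on_tablet:
--             for word in non_commodities:
--                 if word not in commodity_words:
--                     commodity_words[word] = {}
--                 commodity_words[word][comm] = commodity_words[word].get(comm, 0) + 1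
--
--     return commodity_words
-- ===== SOURCE B (Python) =====
-- IDEOGRAMS = {
--     'OLE', 'OLE+U', 'OLE+A', 'OLE+E', 'OLE+KI', 'OLE+MI', 'OLE+DI',
--     'OLE+NE', 'OLE+TA', 'OLE+RI', 'OLE+QIf', 'OLE+TU', 'OLE+RA',
--     'OLE+QE+DI',
--     'GRA', 'VIN', 'FIC', 'NI', 'CYP', 'BOS', 'OVISm', 'OVISf',
--     'CAPm', 'CAPf', 'SUS', 'TELA', 'LANA', 'AES', 'AUR', 'OLIV',
--     'ARE', 'AROM',
-- }
--
-- def compute_commodity_associations(tablet_contents, word_freq):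
--     """Two staged passes: first flatten all tablets into a list of weighted
--     (word, comm, cnt_c*cnt_w) events via per-tablet count dicts, then fold
--     the flat event list into the nested dict."""
--     events = []
--     for info in tablet_contents.values():
--         comm_counts = {}
--         word_counts = {}
--         for w in info['words']:
--             if w.startswith('OLE') or w in IDEOGRAMS:
--                 comm_counts[w] = comm_counts.get(w, 0) + 1
--             elif not (w.startswith('*') or w == 'KU-RO' or w == 'KI-RO'):
--                 word_counts[w] = word_counts.get(w, 0) + 1
--         events.extend((word, comm, c * n)
--                       for comm, c in comm_counts.items()
--                       for word, n in word_counts.items())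
--     result = {}
--     for word, comm, k in events:
--         inner = result.setdefault(word, {})
--         inner[comm] = inner.get(comm, 0) + k
--     return result
-- ===== Notes on version B (the rewrite author's own statement) =====
-- stated objective: alternative
-- what changed: A runs a per-tablet occurrence-by-occurrence double loop adding 1 each time into the nested dict; B is two staged passes: it first classifies each token once into per-tablet count dicts and flattens all tablets into one list of weighted (word, comm, cnt_c*cnt_w) events, then folds that flat event list into the nested dict in a separate aggregation pass.
import Mathlib
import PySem

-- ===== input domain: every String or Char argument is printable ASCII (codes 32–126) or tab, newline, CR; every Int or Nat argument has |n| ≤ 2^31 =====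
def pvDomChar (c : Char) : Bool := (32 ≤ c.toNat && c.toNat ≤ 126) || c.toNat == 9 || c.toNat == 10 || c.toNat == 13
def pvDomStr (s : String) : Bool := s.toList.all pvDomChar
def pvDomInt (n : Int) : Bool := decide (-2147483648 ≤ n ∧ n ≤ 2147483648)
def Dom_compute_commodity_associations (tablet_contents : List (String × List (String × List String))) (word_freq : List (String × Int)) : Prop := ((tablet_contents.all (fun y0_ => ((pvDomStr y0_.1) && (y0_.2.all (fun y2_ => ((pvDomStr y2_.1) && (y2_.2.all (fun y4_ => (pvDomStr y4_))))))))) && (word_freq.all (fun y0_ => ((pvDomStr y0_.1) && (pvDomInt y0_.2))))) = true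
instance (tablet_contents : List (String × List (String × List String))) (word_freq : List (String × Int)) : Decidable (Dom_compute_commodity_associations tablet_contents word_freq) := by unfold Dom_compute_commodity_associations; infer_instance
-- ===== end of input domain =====

-- B replaces A's per-tablet occurrence×occurrence double loop by two staged passes:
-- flatten all tablets into one list of weighted (word, comm, cnt_c*cnt_w) events via
-- per-tablet count dicts, then aggregate the flat event list into the nested dict.

-- ===== PORT A =====
def ccaIdeograms : List String :=
  ["OLE", "OLE+U", "OLE+A", "OLE+E", "OLE+KI", "OLE+MI", "OLE+DI",
   "OLE+NE", "OLE+TA", "OLE+RI", "OLE+QIf", "OLE+TU", "OLE+RA",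
   "OLE+QE+DI",
   "GRA", "VIN", "FIC", "NI", "CYP", "BOS", "OVISm", "OVISf",
   "CAPm", "CAPf", "SUS", "TELA", "LANA", "AES", "AUR", "OLIV",
   "ARE", "AROM"]

-- 'w in IDEOGRAMS or w.startswith("OLE")'
def ccaIsComm (w : String) : Bool :=
  ccaIdeograms.contains w || PySem.Str.startswith w "OLE"

-- 'w not in IDEOGRAMS and not w.startswith("OLE") and not w.startswith("*") and w != "KU-RO" and w != "KI-RO"'
def ccaKeep (w : String) : Bool :=
  !ccaIdeograms.contains w && !PySem.Str.startswith w "OLE" &&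
  !PySem.Str.startswith w "*" && !(w == "KU-RO") && !(w == "KI-RO")

-- the two statements 'if word not in commodity_words: commodity_words[word] = {}' and
-- 'commodity_words[word][comm] = commodity_words[word].get(comm, 0) + 1'
def ccaStepA (cw : PySem.Dict String (PySem.Dict String Int)) (comm word : String) :
    PySem.Dict String (PySem.Dict String Int) :=
  let cw1 := if cw.contains word then cw else cw.insert word PySem.Dict.empty
  let inner := cw1.getD word PySem.Dict.empty
  cw1.insert word (inner.insert comm (inner.getD comm 0 + 1))

def compute_commodity_associations (tablet_contents : List (String × List (String × List String))) (word_freq : List (String × Int)) : List (String × List (String × Int)) :=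
  let cw := tablet_contents.foldl (fun cw p =>
      let words := (PySem.Dict.mk p.2).getD "words" []   -- info['words']; KeyError excluded by Pre_
      let comms := words.filter ccaIsComm
      let noncomms := words.filter ccaKeep
      comms.foldl (fun cw comm => noncomms.foldl (fun cw word => ccaStepA cw comm word) cw) cw)
    PySem.Dict.empty
  cw.items.map (fun q => (q.1, q.2.items))

-- ===== PORT B =====
-- 'w.startswith("OLE") or w in IDEOGRAMS'
def ccbIsComm (w : String) : Bool :=
  PySem.Str.startswith w "OLE" || ccaIdeograms.contains w

-- 'w.startswith("*") or w == "KU-RO" or w == "KI-RO"'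
def ccbSkip (w : String) : Bool :=
  PySem.Str.startswith w "*" || w == "KU-RO" || w == "KI-RO"

-- the per-tablet classification loop building comm_counts and word_counts
def ccbClassify (words : List String) : PySem.Dict String Int × PySem.Dict String Int :=
  words.foldl (fun acc w =>
      if ccbIsComm w then (acc.1.insert w (acc.1.getD w 0 + 1), acc.2)
      else if !(ccbSkip w) then (acc.1, acc.2.insert w (acc.2.getD w 0 + 1))
      else acc)
    (PySem.Dict.empty, PySem.Dict.empty)

-- the generator '((word, comm, c * n) for comm, c in comm_counts.items() for word, n in word_counts.items())'
def ccbEvents (cnts : PySem.Dict String Int × PySem.Dict String Int) : List (String × String × Int) :=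
  cnts.1.items.flatMap (fun q => cnts.2.items.map (fun r => (r.1, q.1, q.2 * r.2)))

-- 'inner = result.setdefault(word, {}); inner[comm] = inner.get(comm, 0) + k'
def ccbAgg (res : PySem.Dict String (PySem.Dict String Int)) (e : String × String × Int) :
    PySem.Dict String (PySem.Dict String Int) :=
  let res1 := res.setdefault e.1 PySem.Dict.empty
  let inner := res1.getD e.1 PySem.Dict.empty
  res1.insert e.1 (inner.insert e.2.1 (inner.getD e.2.1 0 + e.2.2))

def compute_commodity_associations_alt (tablet_contents : List (String × List (String × List String))) (word_freq : List (String × Int)) : List (String × List (String × Int)) :=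
  let events := tablet_contents.foldl (fun ev p =>
      ev ++ ccbEvents (ccbClassify ((PySem.Dict.mk p.2).getD "words" []))) []
  let result := events.foldl ccbAgg PySem.Dict.empty
  result.items.map (fun q => (q.1, q.2.items))

-- ===== PRECONDITION & SPEC =====
-- Pre_ excludes association lists with duplicate dict keys (a Python dict cannot carry them,
-- so they correspond to no Python input) and tablets whose info dict lacks the 'words' key,
-- on which A (and B) raise KeyError.
def Pre_compute_commodity_associations (tablet_contents : List (String × List (String × List String))) (word_freq : List (String × Int)) : Prop :=
  (tablet_contents.map Prod.fst).Nodup ∧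
  ∀ p ∈ tablet_contents, (p.2.map Prod.fst).Nodup ∧ "words" ∈ p.2.map Prod.fst
instance (tablet_contents : List (String × List (String × List String))) (word_freq : List (String × Int)) : Decidable (Pre_compute_commodity_associations tablet_contents word_freq) := by unfold Pre_compute_commodity_associations; infer_instance

def pvWitness_compute_commodity_associations : (List (String × List (String × List String))) × (List (String × Int)) :=
  ([("HT1", [("words", ["GRA", "pa", "GRA", "pa", "KU-RO"])])], [("pa", 2)])

def Spec_compute_commodity_associations (tablet_contents : List (String × List (String × List String))) (word_freq : List (String × Int)) (out : List (String × List (String × Int))) : Prop := out = compute_commodity_associations_alt tablet_contents word_freq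
instance (tablet_contents : List (String × List (String × List String))) (word_freq : List (String × Int)) (out : List (String × List (String × Int))) : Decidable (Spec_compute_commodity_associations tablet_contents word_freq out) := by unfold Spec_compute_commodity_associations; infer_instance

-- ===== CLAIM (what is proved, stated in full; the proofs are below) =====
def Claim_equal_compute_commodity_associations : Prop := ∀ (tablet_contents : List (String × List (String × List String))) (word_freq : List (String × Int)), Dom_compute_commodity_associations tablet_contents word_freq → Pre_compute_commodity_associations tablet_contents word_freq → Spec_compute_commodity_associations tablet_contents word_freq (compute_commodity_associations tablet_contents word_freq)

-- ===== LEMMAS AND PROOFS =====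

abbrev CWd := PySem.Dict String (PySem.Dict String Int)

-- the elif guard of B, A-side spelling
def ccaTail (w : String) : Bool :=
  !PySem.Str.startswith w "*" && !(w == "KU-RO") && !(w == "KI-RO")

-- canonical single update: cw[w][c] += k (creating slots as needed)
def ccaBump (cw : CWd) (w c : String) (k : Int) : CWd :=
  cw.insert w ((cw.getD w PySem.Dict.empty).insert c ((cw.getD w PySem.Dict.empty).getD c 0 + k))

-- canonical shapes of the two per-tablet loops
def ccaInnA (c0 : String) (W : List String) (cw : CWd) : CWd :=
  W.foldl (fun cw w => ccaBump cw w c0 1) cw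
def ccaOccA (C W : List String) (cw : CWd) : CWd :=
  C.foldl (fun cw c => ccaInnA c W cw) cw
def ccaInnB (c0 : String) (m : Int) (its : List (String × Int)) (cw : CWd) : CWd :=
  its.foldl (fun cw r => ccaBump cw r.1 c0 (m * r.2)) cw
def ccaOutB (W : List String) (itsC : List (String × Int)) (cw : CWd) : CWd :=
  itsC.foldl (fun cw q => ccaInnB q.1 q.2 (PySem.Dict.counter W).items cw) cw

def ccaSumAt (its : List (String × Int)) (x : String) : Int :=
  ((its.filter (fun r => r.1 == x)).map Prod.snd).sum

def ccaInv (cw : CWd) : Prop :=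
  cw.keys.Nodup ∧ ∀ w, (cw.getD w PySem.Dict.empty).keys.Nodup

theorem ccaInnA_nil (c0 : String) (cw : CWd) : ccaInnA c0 [] cw = cw := rfl
theorem ccaInnA_cons (c0 w : String) (W : List String) (cw : CWd) :
    ccaInnA c0 (w :: W) cw = ccaInnA c0 W (ccaBump cw w c0 1) := rfl
theorem ccaOccA_nil (W : List String) (cw : CWd) : ccaOccA [] W cw = cw := rfl
theorem ccaOccA_cons (c : String) (C W : List String) (cw : CWd) :
    ccaOccA (c :: C) W cw = ccaOccA C W (ccaInnA c W cw) := rfl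
theorem ccaInnB_nil (c0 : String) (m : Int) (cw : CWd) : ccaInnB c0 m [] cw = cw := rfl
theorem ccaInnB_cons (c0 : String) (m : Int) (r : String × Int) (its : List (String × Int)) (cw : CWd) :
    ccaInnB c0 m (r :: its) cw = ccaInnB c0 m its (ccaBump cw r.1 c0 (m * r.2)) := rfl
theorem ccaOutB_nil (W : List String) (cw : CWd) : ccaOutB W [] cw = cw := rfl
theorem ccaOutB_cons (W : List String) (q : String × Int) (itsC : List (String × Int)) (cw : CWd) :
    ccaOutB W (q :: itsC) cw = ccaOutB W itsC (ccaInnB q.1 q.2 (PySem.Dict.counter W).items cw) := rfl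

theorem cca_stepA_eq_bump (cw : CWd) (comm word : String) :
    ccaStepA cw comm word = ccaBump cw word comm 1 := by
  unfold ccaStepA ccaBump
  cases hc : cw.contains word with
  | true => simp
  | false =>
    simp only [Bool.false_eq_true, if_false, PySem.Dict.getD_insert_self,
      PySem.Dict.insert_insert_self, PySem.Dict.getD_of_not_contains cw _ hc]

theorem ccb_agg_eq_bump (cw : CWd) (e : String × String × Int) :
    ccbAgg cw e = ccaBump cw e.1 e.2.1 e.2.2 := by
  unfold ccbAgg ccaBump
  cases hc : cw.contains e.1 with
  | true => rw [PySem.Dict.setdefault_of_contains cw _ hc]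
  | false =>
    rw [PySem.Dict.setdefault_of_not_contains cw _ hc]
    simp only [PySem.Dict.getD_insert_self, PySem.Dict.insert_insert_self,
      PySem.Dict.getD_of_not_contains cw _ hc]

-- ---- Set helpers ----

theorem cca_keys_insert_add {v : Type} (d : PySem.Dict String v) (k : String) (x : v) :
    (d.insert k x).keys = PySem.Set.add d.keys k := by
  cases hc : d.contains k with
  | true =>
    rw [PySem.Dict.keys_insert_of_contains d x hc,
      PySem.Set.add_of_mem ((PySem.Dict.contains_iff_mem_keys d k).mp hc)]
  | false =>
    rw [PySem.Dict.keys_insert_of_not_contains d x hc, PySem.Set.add_of_not_mem]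
    intro hm
    rw [← PySem.Dict.contains_iff_mem_keys] at hm
    simp [hc] at hm

theorem cca_update_update (K : PySem.Set String) (W : List String) :
    PySem.Set.update (PySem.Set.update K W) W = PySem.Set.update K W := by
  rw [PySem.Set.update_eq_append_filter (K.update W) W]
  have h : List.filter (fun y => !(PySem.Set.contains (PySem.Set.update K W) y)) (PySem.Set.ofList W) = [] := by
    apply List.filter_eq_nil_iff.mpr
    intro y hy
    have hmem : y ∈ PySem.Set.update K W :=
      (PySem.Set.mem_update K W y).mpr (Or.inr ((PySem.Set.mem_ofList W y).mp hy))
    simp [hmem]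
  rw [h, List.append_nil]

theorem cca_update_ofList (K : PySem.Set String) (W : List String) :
    PySem.Set.update K (PySem.Set.ofList W) = PySem.Set.update K W := by
  rw [PySem.Set.update_eq_append_filter K (PySem.Set.ofList W), PySem.Set.ofList_ofList,
    ← PySem.Set.update_eq_append_filter K W]

theorem cca_foldl_const_update {b : Type} (L : List b) (K : PySem.Set String) (W : List String) :
    L.foldl (fun K _ => PySem.Set.update K W) K = if L = [] then K else PySem.Set.update K W := by
  induction L generalizing K with
  | nil => rfl
  | cons x L ih =>
    rw [List.foldl_cons, ih]
    cases L <;> simp [cca_update_update]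

theorem cca_map_fst_counter (L : List String) :
    (PySem.Dict.counter L).items.map Prod.fst = PySem.Set.ofList L := by
  rw [PySem.Dict.items_counter, List.map_map]
  have h : (Prod.fst ∘ fun k : String => (k, (List.count k L : Int))) = id := rfl
  rw [h, List.map_id]

theorem cca_counter_items_nil (C : List String) :
    ((PySem.Dict.counter C).items = []) ↔ C = [] := by
  rw [PySem.Dict.items_counter]
  constructor
  · intro h
    cases C with
    | nil => rfl
    | cons c C => rw [PySem.Set.ofList_cons] at h; simp at h
  · intro h; subst h; simp [PySem.Set.ofList_nil]

-- ---- outer keys ----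

theorem cca_keys_innA (c0 : String) (W : List String) (cw : CWd) :
    (ccaInnA c0 W cw).keys = PySem.Set.update cw.keys W := by
  unfold ccaInnA ccaBump
  exact PySem.Dict.keys_foldl_insert W
    (fun d x => (d.getD x PySem.Dict.empty).insert c0 ((d.getD x PySem.Dict.empty).getD c0 0 + 1)) cw

theorem cca_keys_occA_fold (C W : List String) (cw : CWd) :
    (ccaOccA C W cw).keys = C.foldl (fun K _ => PySem.Set.update K W) cw.keys := by
  induction C generalizing cw with
  | nil => rfl
  | cons c C ih => rw [ccaOccA_cons, ih, cca_keys_innA, List.foldl_cons]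

theorem cca_keys_innB (c0 : String) (m : Int) (its : List (String × Int)) (cw : CWd) :
    (ccaInnB c0 m its cw).keys = PySem.Set.update cw.keys (its.map Prod.fst) := by
  unfold ccaInnB ccaBump
  exact PySem.Dict.keys_foldl_insert_key its Prod.fst
    (fun d r => (d.getD r.1 PySem.Dict.empty).insert c0 ((d.getD r.1 PySem.Dict.empty).getD c0 0 + m * r.2)) cw

theorem cca_keys_outB_fold (W : List String) (itsC : List (String × Int)) (cw : CWd) :
    (ccaOutB W itsC cw).keys = itsC.foldl (fun K _ => PySem.Set.update K W) cw.keys := by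
  induction itsC generalizing cw with
  | nil => rfl
  | cons q itsC ih =>
    rw [ccaOutB_cons, ih, cca_keys_innB, cca_map_fst_counter, cca_update_ofList, List.foldl_cons]

theorem cca_keys_eq (C W : List String) (cw : CWd) :
    (ccaOccA C W cw).keys = (ccaOutB W (PySem.Dict.counter C).items cw).keys := by
  rw [cca_keys_occA_fold, cca_keys_outB_fold, cca_foldl_const_update, cca_foldl_const_update]
  by_cases h : C = []
  · subst h
    simp [cca_counter_items_nil]
  · have h2 : (PySem.Dict.counter C).items ≠ [] := fun hh => h ((cca_counter_items_nil C).mp hh)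
    simp [h, h2]

-- ---- values ----

theorem cca_val_innA (c0 : String) (W : List String) (c w : String) (cw : CWd) :
    ((ccaInnA c0 W cw).getD w PySem.Dict.empty).getD c 0
      = (cw.getD w PySem.Dict.empty).getD c 0 + (if c = c0 then (W.count w : Int) else 0) := by
  induction W generalizing cw with
  | nil => simp [ccaInnA_nil]
  | cons w2 W ih =>
    rw [ccaInnA_cons, ih]
    by_cases hw : w = w2
    · subst hw
      rw [ccaBump, PySem.Dict.getD_insert_self]
      by_cases hc : c = c0
      · subst hc
        rw [PySem.Dict.getD_insert_self, List.count_cons_self]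
        simp
        ring
      · rw [PySem.Dict.getD_insert_of_ne _ _ _ hc]
        simp [hc]
    · rw [ccaBump, PySem.Dict.getD_insert_of_ne _ _ _ hw, List.count_cons_of_ne (Ne.symm hw)]

theorem cca_val_occA (C W : List String) (c w : String) (cw : CWd) :
    ((ccaOccA C W cw).getD w PySem.Dict.empty).getD c 0
      = (cw.getD w PySem.Dict.empty).getD c 0 + (C.count c : Int) * (W.count w : Int) := by
  induction C generalizing cw with
  | nil => simp [ccaOccA_nil]
  | cons c2 C ih =>
    rw [ccaOccA_cons, ih, cca_val_innA]
    by_cases hc : c = c2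
    · subst hc
      rw [List.count_cons_self]
      simp
      ring
    · rw [List.count_cons_of_ne (Ne.symm hc)]
      simp [hc]

theorem cca_sumAt_cons (r : String × Int) (its : List (String × Int)) (x : String) :
    ccaSumAt (r :: its) x = (if r.1 == x then r.2 else 0) + ccaSumAt its x := by
  cases h : r.1 == x <;> simp [ccaSumAt, h]

theorem cca_val_innB (c0 : String) (m : Int) (its : List (String × Int)) (c w : String) (cw : CWd) :
    ((ccaInnB c0 m its cw).getD w PySem.Dict.empty).getD c 0
      = (cw.getD w PySem.Dict.empty).getD c 0 + (if c = c0 then m * ccaSumAt its w else 0) := by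
  induction its generalizing cw with
  | nil => simp [ccaInnB_nil, ccaSumAt]
  | cons r its ih =>
    rw [ccaInnB_cons, ih, cca_sumAt_cons]
    by_cases hw : w = r.1
    · rw [ccaBump, hw, PySem.Dict.getD_insert_self]
      by_cases hc : c = c0
      · subst hc
        rw [PySem.Dict.getD_insert_self]
        simp
        ring
      · rw [PySem.Dict.getD_insert_of_ne _ _ _ hc]
        simp [hc]
    · rw [ccaBump, PySem.Dict.getD_insert_of_ne _ _ _ hw]
      have hb : (r.1 == w) = false := by exact beq_eq_false_iff_ne.mpr (Ne.symm hw)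
      simp [hb]

theorem cca_val_outB (W : List String) (itsC : List (String × Int)) (c w : String) (cw : CWd) :
    ((ccaOutB W itsC cw).getD w PySem.Dict.empty).getD c 0
      = (cw.getD w PySem.Dict.empty).getD c 0
        + (ccaSumAt itsC c) * (ccaSumAt (PySem.Dict.counter W).items w) := by
  induction itsC generalizing cw with
  | nil => simp [ccaOutB_nil, ccaSumAt]
  | cons q itsC ih =>
    rw [ccaOutB_cons, ih, cca_val_innB, cca_sumAt_cons]
    by_cases hc : c = q.1
    · subst hc
      simp
      ring
    · have hb : (q.1 == c) = false := by exact beq_eq_false_iff_ne.mpr (Ne.symm hc)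
      simp [hc, hb]

theorem cca_filter_beq_of_nodup (s : List String) (h : s.Nodup) (x : String) :
    s.filter (fun k => k == x) = if x ∈ s then [x] else [] := by
  induction s with
  | nil => simp
  | cons a s ih =>
    rcases List.nodup_cons.mp h with ⟨ha, hs⟩
    rw [List.filter_cons]
    by_cases hax : a = x
    · subst hax
      simp [ih hs, ha]
    · have hb : (a == x) = false := by simp [hax]
      simp [hb, ih hs, Ne.symm hax]

theorem cca_sumAt_counter (L : List String) (x : String) :
    ccaSumAt (PySem.Dict.counter L).items x = (L.count x : Int) := by
  rw [ccaSumAt, PySem.Dict.items_counter, List.filter_map]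
  have hcomp : ((fun r : String × Int => r.1 == x) ∘ fun k => (k, (List.count k L : Int)))
      = fun k => k == x := rfl
  rw [hcomp, cca_filter_beq_of_nodup _ (PySem.Set.nodup_ofList L) x]
  by_cases hx : x ∈ L
  · simp [(PySem.Set.mem_ofList L x).mpr hx]
  · have : x ∉ PySem.Set.ofList L := fun hh => hx ((PySem.Set.mem_ofList L x).mp hh)
    simp [this, List.count_eq_zero.mpr hx]

-- ---- inner keys ----

theorem cca_ikeys_innA (c0 : String) (W : List String) (w : String) (cw : CWd) :
    ((ccaInnA c0 W cw).getD w PySem.Dict.empty).keys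
      = if w ∈ W then PySem.Set.add (cw.getD w PySem.Dict.empty).keys c0
        else (cw.getD w PySem.Dict.empty).keys := by
  induction W generalizing cw with
  | nil => simp [ccaInnA_nil]
  | cons w2 W ih =>
    rw [ccaInnA_cons, ih]
    by_cases hw : w = w2
    · subst hw
      rw [ccaBump, PySem.Dict.getD_insert_self, cca_keys_insert_add]
      by_cases hmem : w ∈ W
      · simp [hmem]
      · simp [hmem]
    · rw [ccaBump, PySem.Dict.getD_insert_of_ne _ _ _ hw]
      simp [hw]

theorem cca_ikeys_occA (C W : List String) (w : String) (cw : CWd) :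
    ((ccaOccA C W cw).getD w PySem.Dict.empty).keys
      = if w ∈ W then PySem.Set.update (cw.getD w PySem.Dict.empty).keys C
        else (cw.getD w PySem.Dict.empty).keys := by
  induction C generalizing cw with
  | nil => by_cases hw : w ∈ W <;> simp [ccaOccA_nil, hw, PySem.Set.update_nil]
  | cons c2 C ih =>
    rw [ccaOccA_cons, ih, cca_ikeys_innA]
    by_cases hw : w ∈ W
    · simp [hw, PySem.Set.update_cons]
    · simp [hw]

theorem cca_ikeys_innB (c0 : String) (m : Int) (its : List (String × Int)) (w : String) (cw : CWd) :
    ((ccaInnB c0 m its cw).getD w PySem.Dict.empty).keys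
      = if w ∈ its.map Prod.fst then PySem.Set.add (cw.getD w PySem.Dict.empty).keys c0
        else (cw.getD w PySem.Dict.empty).keys := by
  induction its generalizing cw with
  | nil => simp [ccaInnB_nil]
  | cons r its ih =>
    rw [ccaInnB_cons, ih]
    by_cases hw : w = r.1
    · rw [ccaBump, hw, PySem.Dict.getD_insert_self, cca_keys_insert_add]
      by_cases hmem : r.1 ∈ its.map Prod.fst
      · simp [hmem]
      · simp [hmem]
    · rw [ccaBump, PySem.Dict.getD_insert_of_ne _ _ _ hw]
      simp only [List.map_cons, List.mem_cons, hw, false_or]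

theorem cca_ikeys_outB (W : List String) (itsC : List (String × Int)) (w : String) (cw : CWd) :
    ((ccaOutB W itsC cw).getD w PySem.Dict.empty).keys
      = if w ∈ W then PySem.Set.update (cw.getD w PySem.Dict.empty).keys (itsC.map Prod.fst)
        else (cw.getD w PySem.Dict.empty).keys := by
  have hmem : (w ∈ (PySem.Dict.counter W).items.map Prod.fst) ↔ w ∈ W := by
    rw [cca_map_fst_counter]; exact PySem.Set.mem_ofList W w
  induction itsC generalizing cw with
  | nil => by_cases hw : w ∈ W <;> simp [ccaOutB_nil, hw, PySem.Set.update_nil]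
  | cons q itsC ih =>
    rw [ccaOutB_cons, ih, cca_ikeys_innB]
    by_cases hw : w ∈ W
    · rw [if_pos (hmem.mpr hw)]
      simp [hw, PySem.Set.update_cons]
    · rw [if_neg (fun hh => hw (hmem.mp hh))]
      simp [hw]

-- ---- nodup invariant ----

theorem cca_inv_occA (C W : List String) (cw : CWd) (h : ccaInv cw) :
    ccaInv (ccaOccA C W cw) := by
  constructor
  · rw [cca_keys_occA_fold, cca_foldl_const_update]
    split
    · exact h.1
    · exact PySem.Set.nodup_update _ _ h.1
  · intro w
    rw [cca_ikeys_occA]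
    split
    · exact PySem.Set.nodup_update _ _ (h.2 w)
    · exact h.2 w

-- ---- the per-tablet equivalence ----

theorem cca_tablet_eq (C W : List String) (cw : CWd) (h : ccaInv cw) :
    ccaOccA C W cw = ccaOutB W (PySem.Dict.counter C).items cw := by
  have ndA : (ccaOccA C W cw).keys.Nodup := (cca_inv_occA C W cw h).1
  have ndB : (ccaOutB W (PySem.Dict.counter C).items cw).keys.Nodup := by
    rw [← cca_keys_eq]; exact ndA
  have hgetD : ∀ w, (ccaOccA C W cw).getD w PySem.Dict.empty
      = (ccaOutB W (PySem.Dict.counter C).items cw).getD w PySem.Dict.empty := by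
    intro w
    have ndiA : ((ccaOccA C W cw).getD w PySem.Dict.empty).keys.Nodup := (cca_inv_occA C W cw h).2 w
    have hik : ((ccaOccA C W cw).getD w PySem.Dict.empty).keys
        = ((ccaOutB W (PySem.Dict.counter C).items cw).getD w PySem.Dict.empty).keys := by
      rw [cca_ikeys_occA, cca_ikeys_outB, cca_map_fst_counter, cca_update_ofList]
    have ndiB : ((ccaOutB W (PySem.Dict.counter C).items cw).getD w PySem.Dict.empty).keys.Nodup := by
      rw [← hik]; exact ndiA
    apply PySem.Dict.ext
    rw [PySem.Dict.items_eq_map_keys _ ndiA 0, PySem.Dict.items_eq_map_keys _ ndiB 0, ← hik]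
    apply List.map_congr_left
    intro cx _
    have : ((ccaOccA C W cw).getD w PySem.Dict.empty).getD cx 0
        = ((ccaOutB W (PySem.Dict.counter C).items cw).getD w PySem.Dict.empty).getD cx 0 := by
      rw [cca_val_occA, cca_val_outB, cca_sumAt_counter, cca_sumAt_counter]
    rw [this]
  apply PySem.Dict.ext
  rw [PySem.Dict.items_eq_map_keys _ ndA PySem.Dict.empty,
    PySem.Dict.items_eq_map_keys _ ndB PySem.Dict.empty, ← cca_keys_eq]
  apply List.map_congr_left
  intro w _
  rw [hgetD w]

-- ---- bridging the ports to the canonical shapes ----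

theorem ccb_isComm_eq (w : String) : ccbIsComm w = ccaIsComm w := by
  unfold ccbIsComm ccaIsComm
  exact Bool.or_comm _ _

theorem ccb_tail_eq (w : String) : (!ccbSkip w) = ccaTail w := by
  unfold ccbSkip ccaTail
  cases PySem.Str.startswith w "*" <;> cases w == "KU-RO" <;> cases w == "KI-RO" <;> rfl

theorem cca_keep_eq (w : String) : ccaKeep w = (!ccaIsComm w && ccaTail w) := by
  unfold ccaKeep ccaIsComm ccaTail
  cases ccaIdeograms.contains w <;> cases PySem.Str.startswith w "OLE" <;>
    simp [Bool.and_assoc]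

theorem cca_classify_general (ws : List String) (d1 d2 : PySem.Dict String Int) :
    ws.foldl (fun acc w =>
        if ccaIsComm w then (acc.1.insert w (acc.1.getD w 0 + 1), acc.2)
        else if ccaTail w then (acc.1, acc.2.insert w (acc.2.getD w 0 + 1))
        else acc) (d1, d2)
      = ((ws.filter ccaIsComm).foldl (fun d x => d.insert x (d.getD x 0 + 1)) d1,
         (ws.filter (fun w => !ccaIsComm w && ccaTail w)).foldl
           (fun d x => d.insert x (d.getD x 0 + 1)) d2) := by
  induction ws generalizing d1 d2 with
  | nil => rfl
  | cons w ws ih =>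
    rw [List.foldl_cons, List.filter_cons, List.filter_cons]
    cases h1 : ccaIsComm w with
    | true => simp [ih]
    | false =>
      cases h2 : ccaTail w with
      | true => simp [ih]
      | false => simp [ih]

theorem ccb_classify (ws : List String) :
    ccbClassify ws
      = (PySem.Dict.counter (ws.filter ccaIsComm), PySem.Dict.counter (ws.filter ccaKeep)) := by
  unfold ccbClassify
  have hstep : (fun (acc : PySem.Dict String Int × PySem.Dict String Int) w =>
        if ccbIsComm w then (acc.1.insert w (acc.1.getD w 0 + 1), acc.2)
        else if !(ccbSkip w) then (acc.1, acc.2.insert w (acc.2.getD w 0 + 1))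
        else acc)
      = (fun acc w =>
        if ccaIsComm w then (acc.1.insert w (acc.1.getD w 0 + 1), acc.2)
        else if ccaTail w then (acc.1, acc.2.insert w (acc.2.getD w 0 + 1))
        else acc) := by
    funext acc w
    rw [ccb_isComm_eq, ccb_tail_eq]
  rw [hstep, cca_classify_general, PySem.Dict.foldl_insert_getD_add_one_eq_counter,
    PySem.Dict.foldl_insert_getD_add_one_eq_counter]
  have : ws.filter (fun w => !ccaIsComm w && ccaTail w) = ws.filter ccaKeep :=
    List.filter_congr (fun w _ => (cca_keep_eq w).symm)
  rw [this]

theorem cca_Astep_eq (C W : List String) (cw : CWd) :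
    C.foldl (fun cw comm => W.foldl (fun cw word => ccaStepA cw comm word) cw) cw
      = ccaOccA C W cw := by
  unfold ccaOccA ccaInnA
  simp only [cca_stepA_eq_bump]

-- B's aggregation of the mapped inner events is the canonical inner loop
theorem ccb_agg_map_eq (c0 : String) (m : Int) (its : List (String × Int)) (cw : CWd) :
    (its.map (fun r => (r.1, c0, m * r.2))).foldl ccbAgg cw = ccaInnB c0 m its cw := by
  induction its generalizing cw with
  | nil => rfl
  | cons r its ih =>
    rw [List.map_cons, List.foldl_cons, ccaInnB_cons, ccb_agg_eq_bump]
    exact ih _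

-- B's aggregation of one tablet's flattened events is the canonical outer loop
theorem ccb_agg_flat_eq (itsC itsW : List (String × Int)) (W : List String)
    (hW : itsW = (PySem.Dict.counter W).items) (cw : CWd) :
    (itsC.flatMap (fun q => itsW.map (fun r => (r.1, q.1, q.2 * r.2)))).foldl ccbAgg cw
      = ccaOutB W itsC cw := by
  subst hW
  induction itsC generalizing cw with
  | nil => rfl
  | cons q itsC ih =>
    rw [List.flatMap_cons, List.foldl_append, ccaOutB_cons, ccb_agg_map_eq]
    exact ih _

-- stage-2 fold over a concatenation of per-tablet event blocks = per-tablet folds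
theorem ccb_foldl_flatMap {b : Type} (L : List b) (g : b → List (String × String × Int)) (cw : CWd) :
    (L.flatMap g).foldl ccbAgg cw = L.foldl (fun cw x => (g x).foldl ccbAgg cw) cw := by
  induction L generalizing cw with
  | nil => rfl
  | cons x L ih =>
    rw [List.flatMap_cons, List.foldl_append, List.foldl_cons]
    exact ih _

-- A's whole loop reaches the canonical per-tablet ccaOutB fold
theorem cca_topA (tc : List (String × List (String × List String))) :
    ∀ cw : CWd, ccaInv cw →
    tc.foldl (fun cw p =>
        ((((PySem.Dict.mk p.2).getD "words" []).filter ccaIsComm).foldl (fun cw comm =>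
          (((PySem.Dict.mk p.2).getD "words" []).filter ccaKeep).foldl
            (fun cw word => ccaStepA cw comm word) cw) cw)) cw
    = tc.foldl (fun cw p =>
        ccaOutB (((PySem.Dict.mk p.2).getD "words" []).filter ccaKeep)
          (PySem.Dict.counter (((PySem.Dict.mk p.2).getD "words" []).filter ccaIsComm)).items cw) cw := by
  induction tc with
  | nil => intro cw _; rfl
  | cons p tc ih =>
    intro cw h
    rw [List.foldl_cons, List.foldl_cons, cca_Astep_eq, cca_tablet_eq _ _ _ h]
    rw [← cca_tablet_eq _ _ _ h]
    exact ih _ (cca_inv_occA _ _ _ h)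

theorem cca_inv_empty : ccaInv PySem.Dict.empty := by
  constructor
  · exact PySem.Dict.nodup_keys_empty
  · intro w
    rw [PySem.Dict.getD_empty]
    exact PySem.Dict.nodup_keys_empty

-- ===== VERDICT (by name: the statement is the Claim_ definition above) =====
theorem compute_commodity_associations_spec : Claim_equal_compute_commodity_associations := by
  unfold Claim_equal_compute_commodity_associations
  intro tablet_contents word_freq _ _
  unfold Spec_compute_commodity_associations
  unfold compute_commodity_associations compute_commodity_associations_alt
  apply congrArg (fun cw : CWd => cw.items.map (fun q => (q.1, q.2.items)))
  rw [PySem.List.foldl_append_eq_flatMap, List.nil_append, ccb_foldl_flatMap]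
  have hB : ∀ p : String × List (String × List String),
      (ccbEvents (ccbClassify ((PySem.Dict.mk p.2).getD "words" []))).foldl ccbAgg
        = fun cw => ccaOutB (((PySem.Dict.mk p.2).getD "words" []).filter ccaKeep)
            (PySem.Dict.counter (((PySem.Dict.mk p.2).getD "words" []).filter ccaIsComm)).items cw := by
    intro p
    funext cw
    rw [ccbEvents, ccb_classify]
    exact ccb_agg_flat_eq _ _ _ rfl cw
  calc tablet_contents.foldl (fun cw p =>
        ((((PySem.Dict.mk p.2).getD "words" []).filter ccaIsComm).foldl (fun cw comm =>
          (((PySem.Dict.mk p.2).getD "words" []).filter ccaKeep).foldl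
            (fun cw word => ccaStepA cw comm word) cw) cw)) PySem.Dict.empty
      = tablet_contents.foldl (fun cw p =>
          ccaOutB (((PySem.Dict.mk p.2).getD "words" []).filter ccaKeep)
            (PySem.Dict.counter (((PySem.Dict.mk p.2).getD "words" []).filter ccaIsComm)).items cw)
          PySem.Dict.empty := cca_topA tablet_contents PySem.Dict.empty cca_inv_empty
    _ = tablet_contents.foldl (fun cw p =>
          (ccbEvents (ccbClassify ((PySem.Dict.mk p.2).getD "words" []))).foldl ccbAgg cw)
          PySem.Dict.empty := by
        have hfun : (fun (cw : CWd) (p : String × List (String × List String)) =>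
              ccaOutB (((PySem.Dict.mk p.2).getD "words" []).filter ccaKeep)
                (PySem.Dict.counter (((PySem.Dict.mk p.2).getD "words" []).filter ccaIsComm)).items cw)
            = fun cw p => (ccbEvents (ccbClassify ((PySem.Dict.mk p.2).getD "words" []))).foldl ccbAgg cw := by
          funext cw p
          exact (congrFun (hB p) cw).symm
        rw [hfun]
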